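-- pv_equiv track=rewrite | github.com/sunnyhxu/Matroid10 | python/neuro_symbolic/actions.py | enumerate_representable_bases
-- ===== SOURCE A (Python) =====
-- from itertools import combinations
-- from typing import Dict, Iterable, List, Sequence, Tuple
--
-- def decode_matrix_col(encoded: int, field: int, rank: int) -> List[int]:
--     value = int(encoded)
--     digits: List[int] = []
--     for _ in range(rank):
--         digits.append(value % field)
--         value //= field
--     return digits
--
-- def decode_matrix_cols(matrix_cols: Sequence[int], field: int, rank: int) -> List[List[int]]:
--     return [decode_matrix_col(value, field, rank) for value in matrix_cols]
--
-- def _modular_inverse(value: int, field: int) -> int: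
--     reduced = value % field
--     if reduced == 0:
--         raise ValueError("zero_has_no_inverse")
--     if field == 2:
--         return 1
--     if field == 3:
--         return 1 if reduced == 1 else 2
--     raise ValueError(f"unsupported_field:{field}")
--
-- def matrix_rank(matrix_cols: Sequence[int], field: int, rank: int, subset_indices: Sequence[int] | None = None) -> int:
--     if subset_indices is None:
--         subset_indices = list(range(len(matrix_cols)))
--     decoded = decode_matrix_cols([matrix_cols[index] for index in subset_indices], field, rank)
--     if not decoded:
--         return 0
--
--     width = len(decoded)
--     matrix = [[decoded[column][row] for column in range(width)] for row in range(rank)]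
--     row_rank = 0
--     for column in range(width):
--         pivot = None
--         for row_index in range(row_rank, rank):
--             if matrix[row_index][column] % field != 0:
--                 pivot = row_index
--                 break
--         if pivot is None:
--             continue
--         if pivot != row_rank:
--             matrix[pivot], matrix[row_rank] = matrix[row_rank], matrix[pivot]
--         inverse = _modular_inverse(matrix[row_rank][column], field)
--         for current_column in range(column, width):
--             matrix[row_rank][current_column] = (matrix[row_rank][current_column] * inverse) % field
--         for row_index in range(rank):
--             if row_index == row_rank:
--                 continue
--             factor = matrix[row_index][column] % field
--             if factor == 0:
--                 continue
--             for current_column in range(column, width):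
--                 matrix[row_index][current_column] = (matrix[row_index][current_column] - factor * matrix[row_rank][current_column]) % field
--         row_rank += 1
--         if row_rank == rank:
--             break
--     return row_rank
--
-- def enumerate_representable_bases(field: int, rank: int, n: int, matrix_cols: Sequence[int]) -> List[int]:
--     bases: List[int] = []
--     for subset in combinations(range(n), rank):
--         if matrix_rank(matrix_cols, field, rank, list(subset)) == rank:
--             mask = 0
--             for index in subset:
--                 mask |= 1 << index
--             bases.append(mask)
--     return bases
-- ===== SOURCE B (Python) =====
-- def enumerate_representable_bases(field, rank, n, matrix_cols):
--     # DFS over column indices sharing an incremental elimination state T (the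
--     # accumulated row-operation matrix): each candidate column is reduced once
--     # against the current echelon state; dependent columns prune whole subtrees.
--     if rank > max(n, 0):
--         return []  # fewer columns than the required rank: no basis can exist
--     def decode(encoded):
--         value = int(encoded)
--         digits = []
--         for _ in range(rank):
--             digits.append(value % field)
--             value //= field
--         return digits
--
--     bases = []
--
--     def dfs(start, need, T, mask):
--         if need == 0:
--             bases.append(mask)
--             return
--         r = rank - need
--         for c in range(start, n - need + 1):
--             v = decode(matrix_cols[c])
--             w = [sum(t * x for t, x in zip(row, v)) % field for row in T]
--             pivot = next((i for i in range(r, rank) if w[i] != 0), None)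
--             if pivot is None:
--                 continue
--             T2 = [row[:] for row in T]
--             if pivot != r:
--                 T2[pivot], T2[r] = T2[r], T2[pivot]
--                 w[pivot], w[r] = w[r], w[pivot]
--             inv = pow(w[r], field - 2, field)
--             T2[r] = [(inv * x) % field for x in T2[r]]
--             for i in range(rank):
--                 if i == r:
--                     continue
--                 factor = w[i]
--                 if factor == 0:
--                     continue
--                 T2[i] = [(a - factor * b) % field for a, b in zip(T2[i], T2[r])]
--             dfs(c + 1, need - 1, T2, mask | (1 << c))
--
--     identity = [[1 if j == i else 0 for j in range(rank)] for i in range(rank)]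
--     dfs(0, rank, identity, 0)
--     return bases
-- ===== Notes on version B (the rewrite author's own statement) =====
-- stated objective: faster
-- what changed: A runs a full O(r^3) Gaussian elimination from scratch for every one of the C(n,r) candidate subsets; B does a DFS over column indices that shares one incremental elimination state (the accumulated row-operation matrix) per prefix, reduces each candidate column once in O(r^2), and prunes every subtree rooted at a dependent column.
-- outside the precondition, e.g. on enumerate_representable_bases(5, 1, 1, [0]): A returns [], B returns []
import Mathlib
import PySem

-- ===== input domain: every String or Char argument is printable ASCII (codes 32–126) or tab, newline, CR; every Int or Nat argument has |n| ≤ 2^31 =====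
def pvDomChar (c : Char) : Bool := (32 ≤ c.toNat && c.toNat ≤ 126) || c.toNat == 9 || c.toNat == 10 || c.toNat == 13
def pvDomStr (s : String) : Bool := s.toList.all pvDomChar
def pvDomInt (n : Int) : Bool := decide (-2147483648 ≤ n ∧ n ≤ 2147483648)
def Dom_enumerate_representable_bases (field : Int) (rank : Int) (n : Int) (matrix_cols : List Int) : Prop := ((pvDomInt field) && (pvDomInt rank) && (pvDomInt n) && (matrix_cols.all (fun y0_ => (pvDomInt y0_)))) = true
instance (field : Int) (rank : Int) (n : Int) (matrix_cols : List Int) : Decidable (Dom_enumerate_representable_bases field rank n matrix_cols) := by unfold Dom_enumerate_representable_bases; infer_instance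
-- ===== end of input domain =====

-- B replaces per-subset O(r^3) Gaussian elimination with a DFS over column indices that
-- shares one incremental elimination state per prefix, reduces each candidate column once
-- (O(r^2)) and prunes every subtree rooted at a dependent column.

-- shared indexing helpers (Python list indexing; every use is in range by construction)
def pyIdxD (xs : List Int) (i : Int) : Int := (PySem.List.pyGet? xs i).getD 0
def gI (xs : List Int) (i : Nat) : Int := xs.getD i 0
def gR (M : List (List Int)) (i : Nat) : List Int := M.getD i []
def gM (M : List (List Int)) (i c : Nat) : Int := gI (gR M i) c
-- row swap `M[p], M[r] = M[r], M[p]` (both Pythons swap rows of a list of rows)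
def swapRows (M : List (List Int)) (p r : Nat) : List (List Int) :=
  M.mapIdx (fun i row => if i = p then gR M r else if i = r then gR M p else row)
-- `mask |= 1 << idx` ; exact for mask, idx ≥ 0, which holds for all uses (indices come from range(n))
def pyOrBit (mask idx : Int) : Int := Int.ofNat (mask.toNat ||| (1 <<< idx.toNat))

-- ===== PORT A =====

-- decode_matrix_col: `for _ in range(rank)` ported as structural recursion on the count
def decodeColA (encoded field : Int) : Nat → List Int
  | 0 => []
  | k+1 => PySem.Int.mod encoded field :: decodeColA (PySem.Int.floordiv encoded field) field k

-- _modular_inverse; where Python raises ValueError the result is unreachable under Pre_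
def modularInverseA (value f : Int) : Int :=
  let reduced := PySem.Int.mod value f
  if reduced = 0 then 0          -- raise ValueError("zero_has_no_inverse"): unreachable (pivot test guards it)
  else if f = 2 then 1
  else if f = 3 then (if reduced = 1 then 1 else 2)
  else 0                          -- raise ValueError("unsupported_field"): outside Pre_

-- pivot search `for row_index in range(row_rank, rank): if matrix[row_index][column] % field != 0`
def findPivotA (f : Int) (M : List (List Int)) (t r rank : Nat) : Option Nat :=
  (List.range' r (rank - r)).find? (fun i => PySem.Int.mod (gM M i t) f != 0)

-- body of one successful elimination step: swap, scale row r from column t on, eliminate other rows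
def stepA (f : Int) (M : List (List Int)) (t r p : Nat) : List (List Int) :=
  let M1 := if p ≠ r then swapRows M p r else M
  let inv := modularInverseA (gM M1 r t) f
  let M2 := M1.mapIdx (fun i row =>
    if i = r then row.mapIdx (fun c x => if t ≤ c then PySem.Int.mod (inv * x) f else x) else row)
  M2.mapIdx (fun i row =>
    if i = r then row
    else
      let factor := PySem.Int.mod (gM M2 i t) f
      if factor = 0 then row
      else row.mapIdx (fun c x => if t ≤ c then PySem.Int.mod (x - factor * gM M2 r c) f else x))

-- `for column in range(width)` with the final `break` when row_rank reaches rank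
def elimA (f : Int) (rank : Nat) : List Nat → List (List Int) → Nat → Nat
  | [], _M, r => r
  | t :: rest, M, r =>
    match findPivotA f M t r rank with
    | none => elimA f rank rest M r
    | some p =>
      let M3 := stepA f M t r p
      if r + 1 = rank then r + 1 else elimA f rank rest M3 (r + 1)

def matrixRankA (matrix_cols : List Int) (field rank : Int) (subset : List Int) : Int :=
  let decoded := subset.map (fun idx => decodeColA (pyIdxD matrix_cols idx) field rank.toNat)
  if decoded.isEmpty then 0
  else
    let width := decoded.length
    let matrix := (List.range rank.toNat).map (fun row => decoded.map (fun col => gI col row))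
    Int.ofNat (elimA field rank.toNat (List.range width) matrix 0)

-- rank.toNat: combinations(range(n), rank) raises ValueError for negative rank (outside Pre_)
def enumerate_representable_bases (field : Int) (rank : Int) (n : Int) (matrix_cols : List Int) : List Int :=
  (PySem.List.combinations (PySem.List.pyRange 0 n 1) rank.toNat).foldl
    (fun bases subset =>
      if matrixRankA matrix_cols field rank subset = rank then bases ++ [subset.foldl pyOrBit 0]
      else bases) []

-- ===== PORT B =====

def decodeColB (encoded field : Int) : Nat → List Int
  | 0 => []
  | k+1 => PySem.Int.mod encoded field :: decodeColB (PySem.Int.floordiv encoded field) field k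

def dotB (row v : List Int) : Int := (List.zipWith (· * ·) row v).sum

def matvecB (f : Int) (T : List (List Int)) (v : List Int) : List Int :=
  T.map (fun row => PySem.Int.mod (dotB row v) f)

def findPivotB (w : List Int) (r rank : Nat) : Option Nat :=
  (List.range' r (rank - r)).find? (fun i => gI w i != 0)

def swapW (w : List Int) (p r : Nat) : List Int :=
  w.mapIdx (fun i x => if i = p then gI w r else if i = r then gI w p else x)

-- add one independent column: update the accumulated row-operation matrix T
def stepB (f : Int) (r : Nat) (T : List (List Int)) (w : List Int) (p : Nat) : List (List Int) :=
  let T1 := if p ≠ r then swapRows T p r else T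
  let w1 := if p ≠ r then swapW w p r else w
  let inv := PySem.Int.powMod (gI w1 r) (f - 2).toNat f  -- pow(x, field-2, field); exact for field ≥ 2 (for field = 1 the pivot test never fires)
  let T2 := T1.mapIdx (fun i row => if i = r then row.map (fun x => PySem.Int.mod (inv * x) f) else row)
  T2.mapIdx (fun i row =>
    if i = r then row
    else
      let factor := gI w1 i
      if factor = 0 then row
      else List.zipWith (fun a b => PySem.Int.mod (a - factor * b) f) row (gR T2 r))

def dfsB (f n : Int) (matrix_cols : List Int) (rank : Nat) : Nat → Int → List (List Int) → Int → List Int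
  | 0, _start, _T, mask => [mask]
  | nd+1, start, T, mask =>
    (PySem.List.pyRange start (n - ((nd : Int) + 1) + 1) 1).foldl
      (fun acc c =>
        let v := decodeColB (pyIdxD matrix_cols c) f rank
        let w := matvecB f T v
        match findPivotB w (rank - (nd+1)) rank with
        | none => acc
        | some p => acc ++ dfsB f n matrix_cols rank nd (c+1) (stepB f (rank - (nd+1)) T w p) (pyOrBit mask c))
      []

-- rank.toNat: B's Python recursion is over `need`, which stays in [0, rank]; negative rank is outside Pre_
def enumerate_representable_bases_alt (field : Int) (rank : Int) (n : Int) (matrix_cols : List Int) : List Int :=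
  if max n 0 < rank then []  -- fewer columns than the required rank: no basis can exist
  else
    let identity := (List.range rank.toNat).map (fun i => (List.range rank.toNat).map (fun j => if j = i then (1:Int) else 0))
    dfsB field n matrix_cols rank.toNat rank.toNat 0 identity 0

-- ===== PRECONDITION & SPEC =====

-- Pre_ excludes: negative rank (combinations raises ValueError), n larger than the column list when a
-- full-size subset exists (IndexError), and fields other than 1,2,3 (A raises ValueError or
-- ZeroDivisionError whenever elimination meets a nonzero entry; in the degenerate all-zero cases it
-- returns [] exactly as B does).
def Pre_enumerate_representable_bases (field : Int) (rank : Int) (n : Int) (matrix_cols : List Int) : Prop :=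
  0 ≤ rank ∧ (rank = 0 ∨ n < rank ∨ (n ≤ (matrix_cols.length : Int) ∧ (field = 1 ∨ field = 2 ∨ field = 3)))
instance (field : Int) (rank : Int) (n : Int) (matrix_cols : List Int) : Decidable (Pre_enumerate_representable_bases field rank n matrix_cols) := by
  unfold Pre_enumerate_representable_bases; infer_instance

def pvWitness_enumerate_representable_bases : Int × Int × Int × List Int := (2, 2, 3, [1, 2, 3])

def Spec_enumerate_representable_bases (field : Int) (rank : Int) (n : Int) (matrix_cols : List Int) (out : List Int) : Prop := out = enumerate_representable_bases_alt field rank n matrix_cols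
instance (field : Int) (rank : Int) (n : Int) (matrix_cols : List Int) (out : List Int) : Decidable (Spec_enumerate_representable_bases field rank n matrix_cols out) := by unfold Spec_enumerate_representable_bases; infer_instance

-- ===== CLAIM (what is proved, stated in full; the proofs are below) =====
def Claim_equal_enumerate_representable_bases : Prop := ∀ (field : Int) (rank : Int) (n : Int) (matrix_cols : List Int), Dom_enumerate_representable_bases field rank n matrix_cols → Pre_enumerate_representable_bases field rank n matrix_cols → Spec_enumerate_representable_bases field rank n matrix_cols (enumerate_representable_bases field rank n matrix_cols)

-- ===== LEMMAS AND PROOFS =====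

-- B-side acceptance run: feed a list of decoded columns through B's incremental test
def acceptB (f : Int) (rank : Nat) : Nat → List (List Int) → List (List Int) → Option (List (List Int))
  | _r, T, [] => some T
  | r, T, v :: rest =>
    match findPivotB (matvecB f T v) r rank with
    | none => none
    | some p => acceptB f rank (r+1) (stepB f r T (matvecB f T v) p) rest

def colv (matrix_cols : List Int) (f : Int) (rank : Nat) (c : Int) : List Int :=
  decodeColB (pyIdxD matrix_cols c) f rank

-- simulation invariant: row_rank entries of A's matrix agree (mod f) with T applied to the original columns
def SimInv (f : Int) (rank : Nat) (vs M T : List (List Int)) (t : Nat) : Prop :=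
  M.length = rank ∧ (∀ i, i < rank → (gR M i).length = vs.length) ∧
  T.length = rank ∧ (∀ i, i < rank → (gR T i).length = rank) ∧
  (∀ i, i < rank → ∀ c, t ≤ c → c < vs.length →
     (gM M i c) % f = (dotB (gR T i) (vs.getD c [])) % f)

theorem find?_congr_mem {α : Type} {p q : α → Bool} : ∀ l : List α, (∀ x ∈ l, p x = q x) → l.find? p = l.find? q := by
  intro l
  induction l with
  | nil => intro _; rfl
  | cons x xs ih =>
    intro h
    have hx := h x (by simp)
    simp only [List.find?]
    rw [← hx]
    cases p x
    · exact ih (fun y hy => h y (by simp [hy]))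
    · rfl

theorem gR_mapIdx (g : Nat → List Int → List Int) (M : List (List Int)) {i : Nat} (h : i < M.length) :
    gR (M.mapIdx g) i = g i (gR M i) := by
  have h2 : i < (M.mapIdx g).length := by simpa using h
  rw [gR, gR, List.getD_eq_getElem _ _ h2, List.getD_eq_getElem _ _ h, List.getElem_mapIdx]

theorem gI_mapIdx (g : Nat → Int → Int) (row : List Int) {c : Nat} (h : c < row.length) :
    gI (row.mapIdx g) c = g c (gI row c) := by
  have h2 : c < (row.mapIdx g).length := by simpa using h
  rw [gI, gI, List.getD_eq_getElem _ _ h2, List.getD_eq_getElem _ _ h, List.getElem_mapIdx]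

theorem gI_mapRow (g : List Int → Int) (T : List (List Int)) {i : Nat} (h : i < T.length) :
    gI (T.map g) i = g (gR T i) := by
  have h2 : i < (T.map g).length := by simpa using h
  rw [gI, gR, List.getD_eq_getElem _ _ h2, List.getD_eq_getElem _ _ h, List.getElem_map]

theorem length_swapRows (M : List (List Int)) (p r : Nat) : (swapRows M p r).length = M.length := by
  simp [swapRows]

theorem gR_swapRows (M : List (List Int)) (p r : Nat) {i : Nat} (h : i < M.length) :
    gR (swapRows M p r) i = if i = p then gR M r else if i = r then gR M p else gR M i := by
  rw [swapRows, gR_mapIdx _ _ h]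

theorem gI_swapW (w : List Int) (p r : Nat) {i : Nat} (h : i < w.length) :
    gI (swapW w p r) i = if i = p then gI w r else if i = r then gI w p else gI w i := by
  rw [swapW, gI_mapIdx _ _ h]

theorem dotB_cons_cons (a b : Int) (l v : List Int) : dotB (a :: l) (b :: v) = a * b + dotB l v := by
  simp [dotB]

theorem emod_modeq_self (x f : Int) : x % f ≡ x [ZMOD f] :=
  Int.emod_emod_of_dvd x dvd_rfl

theorem dotB_map_modmul {f : Int} (hm : ∀ a : Int, PySem.Int.mod a f = a % f) (inv : Int) :
    ∀ (row v : List Int),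
    dotB (row.map fun x => PySem.Int.mod (inv * x) f) v ≡ inv * dotB row v [ZMOD f] := by
  intro row
  induction row with
  | nil => intro v; simp [dotB]
  | cons a l ih =>
    intro v
    cases v with
    | nil => simp [dotB]
    | cons b w =>
      simp only [List.map_cons, dotB_cons_cons, mul_add, ← mul_assoc]
      exact Int.ModEq.add (by rw [hm]; exact (emod_modeq_self _ _).mul_right b) (ih w)

theorem dotB_zipWith_submod {f : Int} (hm : ∀ a : Int, PySem.Int.mod a f = a % f) (q : Int) :
    ∀ (row s v : List Int), row.length = s.length →
    dotB (List.zipWith (fun a b => PySem.Int.mod (a - q * b) f) row s) v ≡ dotB row v - q * dotB s v [ZMOD f] := by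
  intro row
  induction row with
  | nil =>
    intro s v h
    have : s = [] := by cases s <;> simp_all
    subst this; simp [dotB]
  | cons a l ih =>
    intro s v h
    cases s with
    | nil => simp at h
    | cons b sb =>
      cases v with
      | nil => simp [dotB]
      | cons c vc =>
        simp only [List.zipWith_cons_cons, dotB_cons_cons]
        have h1 : PySem.Int.mod (a - q * b) f * c ≡ (a - q * b) * c [ZMOD f] := by
          rw [hm]; exact (emod_modeq_self _ _).mul_right c
        have h2 := ih sb vc (by simpa using h)
        calc PySem.Int.mod (a - q * b) f * c + dotB (List.zipWith (fun a b => PySem.Int.mod (a - q * b) f) l sb) vc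
            ≡ (a - q * b) * c + (dotB l vc - q * dotB sb vc) [ZMOD f] := Int.ModEq.add h1 h2
          _ = a * c + dotB l vc - q * (b * c + dotB sb vc) := by ring

theorem dotB_zero_left : ∀ (row v : List Int), (∀ j, j < row.length → gI row j = 0) → dotB row v = 0 := by
  intro row
  induction row with
  | nil => intro v _; rfl
  | cons a l ih =>
    intro v h
    cases v with
    | nil => rfl
    | cons b w =>
      have ha : a = 0 := h 0 (by simp) 
      rw [dotB_cons_cons, ha, ih w (fun j hj => by
        have := h (j+1) (by simpa using Nat.succ_lt_succ hj)
        simpa [gI] using this)]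
      ring

theorem dotB_single : ∀ (row v : List Int) (i : Nat), i < row.length →
    gI row i = 1 → (∀ j, j < row.length → j ≠ i → gI row j = 0) → row.length ≤ v.length →
    dotB row v = gI v i := by
  intro row
  induction row with
  | nil => intro v i h; simp at h
  | cons a l ih =>
    intro v i hi h1 h0 hlen
    cases v with
    | nil => simp at hlen
    | cons b w =>
      cases i with
      | zero =>
        have ha : a = 1 := h1
        rw [dotB_cons_cons, ha, dotB_zero_left l w (fun j hj => by
          have := h0 (j+1) (by simpa using Nat.succ_lt_succ hj) (by simp)
          simpa [gI] using this)]
        simp [gI]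
      | succ i =>
        have ha : a = 0 := h0 0 (by simp) (by simp)
        rw [dotB_cons_cons, ha, ih w i (by simpa using hi) (by simpa [gI] using h1)
          (fun j hj hne => by
            have := h0 (j+1) (by simpa using Nat.succ_lt_succ hj) (by simpa using hne)
            simpa [gI] using this) (by simpa using hlen)]
        simp [gI]

theorem decode_len (f : Int) : ∀ (k : Nat) (e : Int), (decodeColB e f k).length = k := by
  intro k; induction k with
  | zero => intro e; rfl
  | succ k ih => intro e; simp [decodeColB, ih]

theorem decode_eq (f : Int) : ∀ (k : Nat) (e : Int), decodeColA e f k = decodeColB e f k := by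
  intro k; induction k with
  | zero => intro e; rfl
  | succ k ih => intro e; simp [decodeColA, decodeColB, ih]

theorem modInv_eq (f x : Int) (hf : f = 2 ∨ f = 3) (hx : x % f ≠ 0) :
    modularInverseA x f = PySem.Int.powMod (x % f) (f - 2).toNat f := by
  rcases hf with h | h <;> subst h
  · have hm : PySem.Int.mod x 2 = x % 2 := PySem.Int.mod_eq_emod_of_pos (by norm_num)
    have h1 : x % 2 = 1 := by omega
    have hL : modularInverseA x 2 = 1 := by simp [modularInverseA, hm, h1]
    rw [hL, h1]; decide
  · have hm : PySem.Int.mod x 3 = x % 3 := PySem.Int.mod_eq_emod_of_pos (by norm_num)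
    have h1 : x % 3 = 1 ∨ x % 3 = 2 := by omega
    rcases h1 with h1 | h1
    · have hL : modularInverseA x 3 = 1 := by simp [modularInverseA, hm, h1]
      rw [hL, h1]; decide
    · have hL : modularInverseA x 3 = 2 := by simp [modularInverseA, hm, h1]
      rw [hL, h1]; decide

-- one elimination step: A's pivot choice equals B's, and the invariant is preserved
theorem stepSim (f : Int) (hf : f = 1 ∨ f = 2 ∨ f = 3)
    (rank : Nat) (vs M T : List (List Int)) (t r : Nat)
    (hvs : ∀ c, c < vs.length → (vs.getD c []).length = rank)
    (ht : t < vs.length) (hr : r ≤ rank)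
    (hI : SimInv f rank vs M T t) :
    findPivotA f M t r rank = findPivotB (matvecB f T (vs.getD t [])) r rank ∧
    (∀ p, findPivotA f M t r rank = some p →
      SimInv f rank vs (stepA f M t r p) (stepB f r T (matvecB f T (vs.getD t [])) p) (t+1)) := by
  obtain ⟨hM, hMr, hT, hTr, hcong⟩ := hI
  have hpos : (0:Int) < f := by rcases hf with h|h|h <;> simp [h]
  have hm : ∀ a : Int, PySem.Int.mod a f = a % f := fun a => PySem.Int.mod_eq_emod_of_pos hpos
  have hvlen : (vs.getD t []).length = rank := hvs t ht
  set v := vs.getD t [] with hvdef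
  set w := matvecB f T v with hwdef
  have hwlen : w.length = rank := by simp [hwdef, matvecB, hT]
  have hw : ∀ i, i < rank → gI w i = dotB (gR T i) v % f := by
    intro i hi
    rw [hwdef, matvecB, gI_mapRow _ _ (by rw [hT]; exact hi), hm]
  have hwM : ∀ i, i < rank → gI w i = gM M i t % f := by
    intro i hi; rw [hw i hi, hcong i hi t le_rfl ht]
  have hpiveq : findPivotA f M t r rank = findPivotB w r rank := by
    unfold findPivotA findPivotB
    apply find?_congr_mem
    intro x hx
    have hxr := List.mem_range'_1.mp hx
    have hxrank : x < rank := by omega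
    rw [hm, ← hwM x hxrank]
  refine ⟨hpiveq, ?_⟩
  intro p hp
  have hmem := List.mem_of_find?_eq_some hp
  have hprb := List.mem_range'_1.mp hmem
  have hprank : p < rank := by omega
  have hrp : r ≤ p := hprb.1
  have hrrank : r < rank := lt_of_le_of_lt hrp hprank
  have hpredA := List.find?_some hp
  have hpA : gM M p t % f ≠ 0 := by
    intro h0
    rw [hm] at hpredA
    rw [h0] at hpredA
    simp at hpredA
  have hf23 : f = 2 ∨ f = 3 := by
    rcases hf with h|h|h
    · exfalso; apply hpA; rw [h]; exact Int.emod_one _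
    · exact Or.inl h
    · exact Or.inr h
  -- the swapped states
  set M1 := (if p ≠ r then swapRows M p r else M) with hM1def
  set T1 := (if p ≠ r then swapRows T p r else T) with hT1def
  set w1 := (if p ≠ r then swapW w p r else w) with hw1def
  have hM1len : M1.length = rank := by rw [hM1def]; split <;> simp [length_swapRows, hM]
  have hT1len : T1.length = rank := by rw [hT1def]; split <;> simp [length_swapRows, hT]
  have hw1len : w1.length = rank := by rw [hw1def]; split <;> simp [swapW, hwlen]
  have hgR1 : ∀ i, i < rank → gR M1 i = if i = p then gR M r else if i = r then gR M p else gR M i := by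
    intro i hi
    rw [hM1def]; split
    · exact gR_swapRows M p r (by rw [hM]; exact hi)
    · next hne =>
      have hpr' : p = r := not_not.mp hne
      subst hpr'
      by_cases h1 : i = p <;> simp [h1]
  have hgT1 : ∀ i, i < rank → gR T1 i = if i = p then gR T r else if i = r then gR T p else gR T i := by
    intro i hi
    rw [hT1def]; split
    · exact gR_swapRows T p r (by rw [hT]; exact hi)
    · next hne =>
      have hpr' : p = r := not_not.mp hne
      subst hpr'
      by_cases h1 : i = p <;> simp [h1]
  have hgw1 : ∀ i, i < rank → gI w1 i = if i = p then gI w r else if i = r then gI w p else gI w i := by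
    intro i hi
    rw [hw1def]; split
    · exact gI_swapW w p r (by rw [hwlen]; exact hi)
    · next hne =>
      have hpr' : p = r := not_not.mp hne
      subst hpr'
      by_cases h1 : i = p <;> simp [h1]
  have hM1r : ∀ i, i < rank → (gR M1 i).length = vs.length := by
    intro i hi; rw [hgR1 i hi]
    split_ifs
    · exact hMr r hrrank
    · exact hMr p hprank
    · exact hMr i hi
  have hT1r : ∀ i, i < rank → (gR T1 i).length = rank := by
    intro i hi; rw [hgT1 i hi]
    split_ifs
    · exact hTr r hrrank
    · exact hTr p hprank
    · exact hTr i hi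
  have hcong1 : ∀ i, i < rank → ∀ c, t ≤ c → c < vs.length →
      gM M1 i c % f = dotB (gR T1 i) (vs.getD c []) % f := by
    intro i hi c h1 h2
    simp only [gM]
    rw [hgR1 i hi, hgT1 i hi]
    split_ifs
    · exact hcong r hrrank c h1 h2
    · exact hcong p hprank c h1 h2
    · exact hcong i hi c h1 h2
  have hw1v : ∀ i, i < rank → gI w1 i = gM M1 i t % f := by
    intro i hi
    simp only [gM]
    rw [hgw1 i hi, hgR1 i hi]
    split_ifs
    · exact hwM r hrrank
    · exact hwM p hprank
    · exact hwM i hi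
  have hgR1r : gR M1 r = gR M p := by
    rw [hgR1 r hrrank]
    by_cases h1 : r = p <;> simp [h1]
  have hpiv_r : gM M1 r t % f ≠ 0 := by simp only [gM]; rw [hgR1r]; exact hpA
  set inv := modularInverseA (gM M1 r t) f with hinvdef
  set invB := PySem.Int.powMod (gI w1 r) (f - 2).toNat f with hinvBdef
  have hinveq : invB = inv := by
    rw [hinvBdef, hinvdef, hw1v r hrrank]
    exact (modInv_eq f _ hf23 hpiv_r).symm
  -- the scaled states
  set M2 := M1.mapIdx (fun i row => if i = r then row.mapIdx (fun c x => if t ≤ c then PySem.Int.mod (inv * x) f else x) else row) with hM2def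
  set T2 := T1.mapIdx (fun i row => if i = r then row.map (fun x => PySem.Int.mod (invB * x) f) else row) with hT2def
  have hM2len : M2.length = rank := by simp [hM2def, hM1len]
  have hT2len : T2.length = rank := by simp [hT2def, hT1len]
  have hgR2 : ∀ i, i < rank → gR M2 i =
      if i = r then (gR M1 i).mapIdx (fun c x => if t ≤ c then PySem.Int.mod (inv * x) f else x) else gR M1 i := by
    intro i hi
    rw [hM2def, gR_mapIdx _ _ (by rw [hM1len]; exact hi)]
  have hgT2 : ∀ i, i < rank → gR T2 i =
      if i = r then (gR T1 i).map (fun x => PySem.Int.mod (invB * x) f) else gR T1 i := by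
    intro i hi
    rw [hT2def, gR_mapIdx _ _ (by rw [hT1len]; exact hi)]
  have hM2r : ∀ i, i < rank → (gR M2 i).length = vs.length := by
    intro i hi; rw [hgR2 i hi]; split_ifs <;> simp [hM1r i hi]
  have hT2r : ∀ i, i < rank → (gR T2 i).length = rank := by
    intro i hi; rw [hgT2 i hi]; split_ifs <;> simp [hT1r i hi]
  have hgM2t : ∀ i, i < rank → i ≠ r → gM M2 i t = gM M1 i t := by
    intro i hi hne; simp only [gM]; rw [hgR2 i hi, if_neg hne]
  have hgM2rc : ∀ c, t ≤ c → c < vs.length → gM M2 r c = PySem.Int.mod (inv * gM M1 r c) f := by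
    intro c h1 h2
    simp only [gM]
    rw [hgR2 r hrrank, if_pos rfl, gI_mapIdx _ _ (by rw [hM1r r hrrank]; exact h2), if_pos h1]
  -- characterize the final states
  have hstepA : stepA f M t r p = M2.mapIdx (fun i row =>
      if i = r then row
      else
        let factor := PySem.Int.mod (gM M2 i t) f
        if factor = 0 then row
        else row.mapIdx (fun c x => if t ≤ c then PySem.Int.mod (x - factor * gM M2 r c) f else x)) := rfl
  have hstepB : stepB f r T w p = T2.mapIdx (fun i row =>
      if i = r then row
      else
        let factor := gI w1 i
        if factor = 0 then row
        else List.zipWith (fun a b => PySem.Int.mod (a - factor * b) f) row (gR T2 r)) := rfl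
  rw [hstepA, hstepB]
  have hgRA : ∀ i, i < rank → gR (M2.mapIdx (fun i row =>
      if i = r then row
      else
        let factor := PySem.Int.mod (gM M2 i t) f
        if factor = 0 then row
        else row.mapIdx (fun c x => if t ≤ c then PySem.Int.mod (x - factor * gM M2 r c) f else x))) i =
      if i = r then gR M2 r
      else if PySem.Int.mod (gM M2 i t) f = 0 then gR M2 i
      else (gR M2 i).mapIdx (fun c x => if t ≤ c then PySem.Int.mod (x - PySem.Int.mod (gM M2 i t) f * gM M2 r c) f else x) := by
    intro i hi
    rw [gR_mapIdx _ _ (by rw [hM2len]; exact hi)]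
    by_cases h1 : i = r
    · simp [h1]
    · simp only [if_neg h1]
  have hgRB : ∀ i, i < rank → gR (T2.mapIdx (fun i row =>
      if i = r then row
      else
        let factor := gI w1 i
        if factor = 0 then row
        else List.zipWith (fun a b => PySem.Int.mod (a - factor * b) f) row (gR T2 r))) i =
      if i = r then gR T2 r
      else if gI w1 i = 0 then gR T2 i
      else List.zipWith (fun a b => PySem.Int.mod (a - gI w1 i * b) f) (gR T2 i) (gR T2 r) := by
    intro i hi
    rw [gR_mapIdx _ _ (by rw [hT2len]; exact hi)]
    by_cases h1 : i = r
    · simp [h1]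
    · simp only [if_neg h1]
  -- branch conditions agree
  have hfac : ∀ i, i < rank → i ≠ r → PySem.Int.mod (gM M2 i t) f = gI w1 i := by
    intro i hi hne
    rw [hgM2t i hi hne, hm, ← hw1v i hi]
  -- dot congruences
  have modeq_of : ∀ a b : Int, a % f = b % f → a ≡ b [ZMOD f] := fun _ _ h => h
  have hT2rdot : ∀ c, t ≤ c → c < vs.length →
      dotB (gR T2 r) (vs.getD c []) ≡ inv * gM M1 r c [ZMOD f] := by
    intro c h1 h2
    rw [hgT2 r hrrank, if_pos rfl]
    calc dotB ((gR T1 r).map (fun x => PySem.Int.mod (invB * x) f)) (vs.getD c [])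
        ≡ invB * dotB (gR T1 r) (vs.getD c []) [ZMOD f] := dotB_map_modmul hm invB _ _
      _ ≡ inv * gM M1 r c [ZMOD f] := by
          rw [hinveq]
          exact Int.ModEq.mul_left inv (modeq_of _ _ (hcong1 r hrrank c h1 h2)).symm
  -- assemble the invariant
  refine ⟨by simp [hM2len], ?_, by simp [hT2len], ?_, ?_⟩
  · intro i hi
    rw [hgRA i hi]
    split_ifs
    · exact hM2r r hrrank
    · exact hM2r i hi
    · simp [hM2r i hi]
  · intro i hi
    rw [hgRB i hi]
    split_ifs
    · exact hT2r r hrrank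
    · exact hT2r i hi
    · simp [hT2r i hi, hT2r r hrrank]
  · intro i hi c hc1 hc2
    have htc : t ≤ c := by omega
    rw [gM, hgRA i hi, hgRB i hi]
    by_cases h1 : i = r
    · -- the pivot row: both sides are the scaled row
      subst h1
      rw [if_pos rfl, if_pos rfl]
      have hL : gI (gR M2 i) c = PySem.Int.mod (inv * gM M1 i c) f := hgM2rc c htc hc2
      rw [hL, hm]
      have := hT2rdot c htc hc2
      calc inv * gM M1 i c % f % f = inv * gM M1 i c % f := Int.emod_emod_of_dvd _ dvd_rfl
        _ = dotB (gR T2 i) (vs.getD c []) % f := ((hT2rdot c htc hc2).symm : _)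
    · rw [if_neg h1, if_neg h1, hfac i hi h1]
      by_cases h2 : gI w1 i = 0
      · -- untouched row
        rw [if_pos h2, if_pos h2]
        have hL : gI (gR M2 i) c = gM M1 i c := by
          rw [hgR2 i hi, if_neg h1]; rfl
        have hR : gR T2 i = gR T1 i := by rw [hgT2 i hi, if_neg h1]
        rw [hL, hR]
        exact hcong1 i hi c htc hc2
      · -- eliminated row
        rw [if_neg h2, if_neg h2]
        have hMic : gI (gR M2 i) t = gM M1 i t := hgM2t i hi h1
        have hlen2 : (gR M2 i).length = vs.length := hM2r i hi
        have hentry : gI ((gR M2 i).mapIdx (fun c x => if t ≤ c then PySem.Int.mod (x - gI w1 i * gM M2 r c) f else x)) c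
            = PySem.Int.mod (gM M1 i c - gI w1 i * PySem.Int.mod (inv * gM M1 r c) f) f := by
          rw [gI_mapIdx _ _ (by rw [hlen2]; exact hc2), if_pos htc]
          have e1 : gI (gR M2 i) c = gM M1 i c := by rw [hgR2 i hi, if_neg h1]; rfl
          rw [e1, hgM2rc c htc hc2]
        rw [hentry, hm]
        have hlenzw : (gR T2 i).length = (gR T2 r).length := by
          rw [hT2r i hi, hT2r r hrrank]
        have hzw := dotB_zipWith_submod hm (gI w1 i) (gR T2 i) (gR T2 r) (vs.getD c []) hlenzw
        have hT2i : gR T2 i = gR T1 i := by rw [hgT2 i hi, if_neg h1]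
        calc (gM M1 i c - gI w1 i * PySem.Int.mod (inv * gM M1 r c) f) % f % f
            = (gM M1 i c - gI w1 i * PySem.Int.mod (inv * gM M1 r c) f) % f := Int.emod_emod_of_dvd _ dvd_rfl
          _ = (gM M1 i c - gI w1 i * (inv * gM M1 r c)) % f := by
              have : (gI w1 i * PySem.Int.mod (inv * gM M1 r c) f) ≡ gI w1 i * (inv * gM M1 r c) [ZMOD f] := by
                rw [hm]
                exact Int.ModEq.mul_left _ (emod_modeq_self _ _)
              exact (Int.ModEq.sub (Int.ModEq.refl _) this : _)
          _ = (dotB (gR T1 i) (vs.getD c []) - gI w1 i * dotB (gR T2 r) (vs.getD c [])) % f := by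
              refine ((Int.ModEq.sub ?_ (Int.ModEq.mul_left _ ?_)).symm : _)
              · exact (modeq_of _ _ (hcong1 i hi c htc hc2)).symm
              · exact hT2rdot c htc hc2
          _ = dotB (List.zipWith (fun a b => PySem.Int.mod (a - gI w1 i * b) f) (gR T2 i) (gR T2 r)) (vs.getD c []) % f := by
              rw [hT2i] at hzw ⊢
              exact (hzw : _).symm


theorem elimA_le (f : Int) (rank : Nat) : ∀ (cols : List Nat) (M : List (List Int)) (r : Nat),
    elimA f rank cols M r ≤ r + cols.length := by
  intro cols; induction cols with
  | nil => intro M r; simp [elimA]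
  | cons t rest ih =>
    intro M r
    have hlen : (t :: rest).length = rest.length + 1 := rfl
    rcases h : findPivotA f M t r rank with _ | p <;> simp only [elimA, h]
    · have := ih M r
      rw [hlen]; omega
    · split
      · rw [hlen]; omega
      · have := ih (stepA f M t r p) (r+1)
        rw [hlen]; omega

theorem acceptB_cons (f : Int) (rank r : Nat) (T : List (List Int)) (v : List Int) (rest : List (List Int)) :
    acceptB f rank r T (v :: rest) =
      match findPivotB (matvecB f T v) r rank with
      | none => none
      | some p => acceptB f rank (r+1) (stepB f r T (matvecB f T v) p) rest := rfl

theorem simFold (f : Int) (hf : f = 1 ∨ f = 2 ∨ f = 3) (rank : Nat) (vs : List (List Int))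
    (hlen : vs.length = rank) (hvs : ∀ c, c < vs.length → (vs.getD c []).length = rank) :
    ∀ (k : Nat) (M T : List (List Int)), k ≤ rank → SimInv f rank vs M T (rank - k) →
    ((elimA f rank (List.range' (rank - k) k) M (rank - k) = rank) ↔
      (acceptB f rank (rank - k) T (vs.drop (rank - k))).isSome) := by
  intro k
  induction k with
  | zero =>
    intro M T _ _
    have hdrop : vs.drop rank = [] := by rw [← hlen]; simp
    simp [elimA, hdrop, acceptB]
  | succ k ih =>
    intro M T hk hI
    have ht : rank - (k+1) < vs.length := by rw [hlen]; omega
    have htk : rank - k = rank - (k+1) + 1 := by omega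
    have hdrop : vs.drop (rank - (k+1)) = vs.getD (rank - (k+1)) [] :: vs.drop (rank - (k+1) + 1) := by
      rw [List.getD_eq_getElem _ _ ht]
      exact List.drop_eq_getElem_cons ht
    have hrange : List.range' (rank - (k+1)) (k+1) = (rank - (k+1)) :: List.range' (rank - (k+1) + 1) k := rfl
    obtain ⟨hpiveq, hstep⟩ := stepSim f hf rank vs M T (rank - (k+1)) (rank - (k+1)) hvs ht (by omega) hI
    rw [hrange, hdrop]
    cases hA : findPivotA f M (rank - (k+1)) (rank - (k+1)) rank with
    | none =>
      have hB : findPivotB (matvecB f T (vs.getD (rank - (k+1)) [])) (rank - (k+1)) rank = none := by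
        rw [← hpiveq]; exact hA
      simp only [elimA, acceptB_cons, hA, hB]
      have hle := elimA_le f rank (List.range' (rank - (k+1) + 1) k) M (rank - (k+1))
      simp only [List.length_range'] at hle
      constructor
      · intro h; exfalso; omega
      · intro h; simp at h
    | some p =>
      have hB : findPivotB (matvecB f T (vs.getD (rank - (k+1)) [])) (rank - (k+1)) rank = some p := by
        rw [← hpiveq]; exact hA
      have hI' := hstep p hA
      simp only [elimA, acceptB_cons, hA, hB]
      by_cases hk0 : rank - (k+1) + 1 = rank
      · have hk0' : k = 0 := by omega
        subst hk0'
        rw [if_pos hk0]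
        have hdropnil : vs.drop (rank - (0+1) + 1) = [] := by
          have hh : rank - (0+1) + 1 = vs.length := by omega
          rw [hh]; simp
        rw [hdropnil]
        simp only [acceptB, Option.isSome_some]
        exact iff_of_true hk0 trivial
      · rw [if_neg hk0]
        have hres := ih (stepA f M (rank - (k+1)) (rank - (k+1)) p)
          (stepB f (rank - (k+1)) T (matvecB f T (vs.getD (rank - (k+1)) [])) p)
          (by omega) (by rw [htk]; exact hI')
        rw [htk] at hres
        exact hres

theorem gR_map_range (g : Nat → List Int) {rank i : Nat} (h : i < rank) :
    gR ((List.range rank).map g) i = g i := by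
  have h2 : i < ((List.range rank).map g).length := by simpa using h
  rw [gR, List.getD_eq_getElem _ _ h2, List.getElem_map, List.getElem_range]

theorem gI_map_range (g : Nat → Int) {rank j : Nat} (h : j < rank) :
    gI ((List.range rank).map g) j = g j := by
  have h2 : j < ((List.range rank).map g).length := by simpa using h
  rw [gI, List.getD_eq_getElem _ _ h2, List.getElem_map, List.getElem_range]

theorem Inv_init (f : Int) (rank : Nat) (vs : List (List Int))
    (hvs : ∀ c, c < vs.length → (vs.getD c []).length = rank) :
    SimInv f rank vs
      ((List.range rank).map (fun row => vs.map (fun col => gI col row)))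
      ((List.range rank).map (fun i => (List.range rank).map (fun j => if j = i then (1:Int) else 0)))
      0 := by
  refine ⟨by simp, ?_, by simp, ?_, ?_⟩
  · intro i hi; rw [gR_map_range _ hi]; simp
  · intro i hi; rw [gR_map_range _ hi]; simp
  · intro i hi c _ hc
    have hM : gM ((List.range rank).map (fun row => vs.map (fun col => gI col row))) i c
        = gI (vs.getD c []) i := by
      rw [gM, gR_map_range _ hi, gI_mapRow _ _ (by exact hc)]
      rfl
    have hT : dotB (gR ((List.range rank).map (fun i => (List.range rank).map
        (fun j => if j = i then (1:Int) else 0))) i) (vs.getD c []) = gI (vs.getD c []) i := by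
      rw [gR_map_range _ hi]
      refine dotB_single _ _ i (by simpa using hi) ?_ ?_ ?_
      · rw [gI_map_range (g := fun j => if j = i then (1:Int) else 0) hi]; simp
      · intro j hj hne
        rw [gI_map_range (g := fun j => if j = i then (1:Int) else 0) (by simpa using hj)]
        simp [hne]
      · rw [hvs c hc]; simp
    rw [hM, hT]

-- per-subset equivalence: A's full Gaussian elimination accepts exactly when B's incremental run does
theorem rank_iff_accept (f : Int) (hf : f = 1 ∨ f = 2 ∨ f = 3) (rank : Nat) (vs : List (List Int))
    (hlen : vs.length = rank) (hvs : ∀ c, c < vs.length → (vs.getD c []).length = rank) :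
    (elimA f rank (List.range rank) ((List.range rank).map (fun row => vs.map (fun col => gI col row))) 0 = rank) ↔
    (acceptB f rank 0 ((List.range rank).map (fun i => (List.range rank).map (fun j => if j = i then (1:Int) else 0))) vs).isSome := by
  have h := simFold f hf rank vs hlen hvs rank _ _ (le_refl rank) (by simpa using Inv_init f rank vs hvs)
  simpa [List.range_eq_range'] using h

theorem dfsB_succ (f n : Int) (matrix_cols : List Int) (rank nd : Nat) (start : Int) (T : List (List Int)) (mask : Int) :
    dfsB f n matrix_cols rank (nd+1) start T mask =
      (PySem.List.pyRange start (n - ((nd : Int) + 1) + 1) 1).flatMap (fun c =>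
        match findPivotB (matvecB f T (decodeColB (pyIdxD matrix_cols c) f rank)) (rank - (nd+1)) rank with
        | none => []
        | some p => dfsB f n matrix_cols rank nd (c+1)
            (stepB f (rank - (nd+1)) T (matvecB f T (decodeColB (pyIdxD matrix_cols c) f rank)) p) (pyOrBit mask c)) := by
  have gen : ∀ (l : List Int) (acc : List Int),
      l.foldl (fun acc c =>
        let v := decodeColB (pyIdxD matrix_cols c) f rank
        let w := matvecB f T v
        match findPivotB w (rank - (nd+1)) rank with
        | none => acc
        | some p => acc ++ dfsB f n matrix_cols rank nd (c+1) (stepB f (rank - (nd+1)) T w p) (pyOrBit mask c)) acc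
      = acc ++ l.flatMap (fun c =>
        match findPivotB (matvecB f T (decodeColB (pyIdxD matrix_cols c) f rank)) (rank - (nd+1)) rank with
        | none => []
        | some p => dfsB f n matrix_cols rank nd (c+1)
            (stepB f (rank - (nd+1)) T (matvecB f T (decodeColB (pyIdxD matrix_cols c) f rank)) p) (pyOrBit mask c)) := by
    intro l
    induction l with
    | nil => intro acc; simp
    | cons x xs ih =>
      intro acc
      simp only [List.foldl_cons, List.flatMap_cons]
      cases h : findPivotB (matvecB f T (decodeColB (pyIdxD matrix_cols x) f rank)) (rank - (nd+1)) rank with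
      | none => simp [h, ih]
      | some p => simp [h, ih, List.append_assoc]
  show (PySem.List.pyRange start (n - ((nd : Int) + 1) + 1) 1).foldl _ [] = _
  rw [gen]
  simp

theorem dfs_char (f n : Int) (matrix_cols : List Int) (rank : Nat) :
    ∀ (need : Nat), need ≤ rank → ∀ (start : Int) (T : List (List Int)) (mask : Int),
    dfsB f n matrix_cols rank need start T mask =
      (PySem.List.combinations (PySem.List.pyRange start n 1) need).filterMap
        (fun Q => (acceptB f rank (rank - need) T (Q.map (colv matrix_cols f rank))).map
          (fun _ => Q.foldl pyOrBit mask)) := by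
  intro need
  induction need with
  | zero =>
    intro _ start T mask
    simp [dfsB, PySem.List.combinations_zero, acceptB]
  | succ nd ihneed =>
    intro hnd
    have hnd' : nd ≤ rank := by omega
    suffices main : ∀ (m : Nat) (start : Int) (T : List (List Int)) (mask : Int), (n - start).toNat = m →
        dfsB f n matrix_cols rank (nd+1) start T mask =
          (PySem.List.combinations (PySem.List.pyRange start n 1) (nd+1)).filterMap
            (fun Q => (acceptB f rank (rank - (nd+1)) T (Q.map (colv matrix_cols f rank))).map
              (fun _ => Q.foldl pyOrBit mask)) by
      intro start T mask
      exact main (n - start).toNat start T mask rfl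
    intro m
    induction m using Nat.strong_induction_on with
    | _ m IH =>
      intro start T mask hm
      by_cases hsn : start < n
      · by_cases hbound : start + ((nd : Int) + 1) ≤ n
        · -- head candidate exists on both sides
          have hcons : PySem.List.pyRange start (n - ((nd : Int) + 1) + 1) 1
              = start :: PySem.List.pyRange (start+1) (n - ((nd : Int) + 1) + 1) 1 :=
            PySem.List.pyRange_one_cons (by omega)
          rw [dfsB_succ, hcons, List.flatMap_cons, PySem.List.pyRange_one_cons hsn,
            PySem.List.combinations_cons_succ, List.filterMap_append, List.filterMap_map]
          have htail : (PySem.List.pyRange (start+1) (n - ((nd : Int) + 1) + 1) 1).flatMap (fun c =>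
              match findPivotB (matvecB f T (decodeColB (pyIdxD matrix_cols c) f rank)) (rank - (nd+1)) rank with
              | none => []
              | some p => dfsB f n matrix_cols rank nd (c+1)
                  (stepB f (rank - (nd+1)) T (matvecB f T (decodeColB (pyIdxD matrix_cols c) f rank)) p) (pyOrBit mask c))
              = dfsB f n matrix_cols rank (nd+1) (start+1) T mask := (dfsB_succ f n matrix_cols rank nd (start+1) T mask).symm
          rw [htail, IH ((n - (start+1)).toNat) (by omega) (start+1) T mask rfl]
          congr 1
          -- head part
          cases hpv : findPivotB (matvecB f T (decodeColB (pyIdxD matrix_cols start) f rank)) (rank - (nd+1)) rank with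
          | none =>
            simp only [hpv]
            symm
            apply List.filterMap_eq_nil_iff.mpr
            intro Q hQ
            simp only [Function.comp, List.map_cons, acceptB_cons, colv, hpv]
            rfl
          | some p =>
            simp only [hpv]
            rw [ihneed hnd' (start+1) (stepB f (rank - (nd+1)) T (matvecB f T (decodeColB (pyIdxD matrix_cols start) f rank)) p) (pyOrBit mask start)]
            apply List.filterMap_congr
            intro Q hQ
            simp only [Function.comp, List.map_cons, acceptB_cons, colv, hpv]
            have hstep : rank - (nd+1) + 1 = rank - nd := by omega
            rw [hstep]
            rfl
        · -- no candidate fits: both sides empty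
          have h2 : PySem.List.pyRange start (n - ((nd : Int) + 1) + 1) 1 = [] :=
            PySem.List.pyRange_one_eq_nil (by omega)
          have hlen : (PySem.List.pyRange start n 1).length < nd + 1 := by
            rw [PySem.List.length_pyRange_one]; omega
          rw [dfsB_succ, h2, List.flatMap_nil, PySem.List.combinations_eq_nil_of_length_lt _ hlen,
            List.filterMap_nil]
      · -- start ≥ n: everything empty
        have h1 : PySem.List.pyRange start n 1 = [] := PySem.List.pyRange_one_eq_nil (by omega)
        have h2 : PySem.List.pyRange start (n - ((nd : Int) + 1) + 1) 1 = [] :=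
          PySem.List.pyRange_one_eq_nil (by omega)
        rw [dfsB_succ, h2, List.flatMap_nil, h1, PySem.List.combinations_nil_succ, List.filterMap_nil]

theorem foldl_if_append {α : Type} (p : α → Prop) [DecidablePred p] (g : α → Int) :
    ∀ (l : List α) (acc : List Int),
    l.foldl (fun acc x => if p x then acc ++ [g x] else acc) acc
      = acc ++ l.filterMap (fun x => if p x then some (g x) else none) := by
  intro l
  induction l with
  | nil => intro acc; simp
  | cons x xs ih =>
    intro acc
    by_cases h : p x <;> simp [h, ih]

-- ===== VERDICT (by name: the statement is the Claim_ definition above) =====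
theorem enumerate_representable_bases_spec : Claim_equal_enumerate_representable_bases := by
  intro field rank n matrix_cols _hDom hPre
  obtain ⟨hr0, hcase⟩ := hPre
  unfold Spec_enumerate_representable_bases
  by_cases hz : rank = 0
  · -- rank = 0: both programs return [0]
    subst hz
    simp [enumerate_representable_bases, enumerate_representable_bases_alt,
      PySem.List.combinations_zero, matrixRankA, dfsB]
  · by_cases hlt : n < rank
    · -- n < rank: no subset of size rank exists; both return []
      have hclen : (PySem.List.pyRange 0 n 1).length < rank.toNat := by
        rw [PySem.List.length_pyRange_one]; omega
      rw [enumerate_representable_bases, enumerate_representable_bases_alt,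
        PySem.List.combinations_eq_nil_of_length_lt _ hclen, List.foldl_nil,
        if_pos (by omega)]
    · -- the main case: field ∈ {1,2,3}
      have hf : field = 1 ∨ field = 2 ∨ field = 3 := by
        rcases hcase with h | h | h
        · exact absurd h hz
        · exact absurd h hlt
        · exact h.2
      rw [enumerate_representable_bases, enumerate_representable_bases_alt, if_neg (by omega)]
      rw [
        foldl_if_append (fun subset => matrixRankA matrix_cols field rank subset = rank)
          (fun subset => subset.foldl pyOrBit 0),
        dfs_char field n matrix_cols rank.toNat rank.toNat le_rfl 0 _ 0]
      rw [List.nil_append, Nat.sub_self]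
      apply List.filterMap_congr
      intro Q hQ
      have hQlen : Q.length = rank.toNat := PySem.List.length_of_mem_combinations hQ
      have hvs : ∀ c, c < (Q.map (colv matrix_cols field rank.toNat)).length →
          ((Q.map (colv matrix_cols field rank.toNat)).getD c []).length = rank.toNat := by
        intro c hc
        simp only [List.length_map] at hc
        rw [List.getD_eq_getElem _ _ (by simpa using hc), List.getElem_map]
        exact decode_len _ _ _
      have hvslen : (Q.map (colv matrix_cols field rank.toNat)).length = rank.toNat := by
        simp [hQlen]
      have hiff := rank_iff_accept field hf rank.toNat (Q.map (colv matrix_cols field rank.toNat)) hvslen hvs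
      have hQne : Q ≠ [] := by
        intro h; rw [h] at hQlen; simp at hQlen; omega
      have hdec : Q.map (fun idx => decodeColA (pyIdxD matrix_cols idx) field rank.toNat)
          = Q.map (colv matrix_cols field rank.toNat) := by
        apply List.map_congr_left
        intro x _
        rw [colv, decode_eq]
      have hM0 : matrixRankA matrix_cols field rank Q
          = Int.ofNat (elimA field rank.toNat (List.range (Q.map (colv matrix_cols field rank.toNat)).length)
              ((List.range rank.toNat).map (fun row => (Q.map (colv matrix_cols field rank.toNat)).map (fun col => gI col row))) 0) := by
        rw [matrixRankA]
        simp only [hdec]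
        rw [if_neg (by simpa [List.isEmpty_iff] using hQne)]
      rw [hM0, hvslen]
      cases hacc : acceptB field rank.toNat 0
          ((List.range rank.toNat).map (fun i => (List.range rank.toNat).map (fun j => if j = i then (1:Int) else 0)))
          (Q.map (colv matrix_cols field rank.toNat)) with
      | none =>
        rw [hacc] at hiff
        simp only [Option.map_none]
        rw [if_neg]
        intro h
        rw [Int.ofNat_eq_natCast] at h
        have : elimA field rank.toNat (List.range rank.toNat)
            ((List.range rank.toNat).map (fun row => (Q.map (colv matrix_cols field rank.toNat)).map (fun col => gI col row))) 0 = rank.toNat := by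
          omega
        exact absurd (hiff.mp this) (by simp)
      | some T' =>
        rw [hacc] at hiff
        simp only [Option.map_some]
        rw [if_pos]
        have : elimA field rank.toNat (List.range rank.toNat)
            ((List.range rank.toNat).map (fun row => (Q.map (colv matrix_cols field rank.toNat)).map (fun col => gI col row))) 0 = rank.toNat :=
          hiff.mpr (by simp)
        rw [Int.ofNat_eq_natCast]
        omega
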